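-- pv_equiv track=rewrite | github.com/mcarbono3/Henry | henry-backend/services/ai_service.py | _generate_student_response
-- ===== SOURCE A (Python) =====
-- def _generate_student_response(message, user_name):
--     """Genera respuestas específicas para estudiantes"""
--     if any(word in message for word in ['explicar', 'explain', 'entender', 'understand', 'concepto']):
--         return f"¡Por supuesto, {user_name}! Me encanta explicar conceptos. Para darte la mejor explicación posible:\n\n• Dime qué concepto específico quieres que explique\n• Indica la materia o área de estudio\n• Menciona tu nivel actual de conocimiento\n\nAsí podré adaptar mi explicación a tu nivel y estilo de aprendizaje."
--
--     elif any(word in message for word in ['ejercicio', 'problema', 'tarea', 'homework']):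
--         return f"Te ayudo a resolver ejercicios paso a paso, {user_name}. Para darte la mejor asistencia:\n\n• Comparte el enunciado completo del problema\n• Indica la materia (matemáticas, física, química, etc.)\n• Dime qué parte específica te está causando dificultad\n\nTe guiaré a través de la solución de manera didáctica."
--
--     elif any(word in message for word in ['examen', 'exam', 'estudiar', 'study', 'repasar']):
--         return f"¡Perfecto, {user_name}! Te ayudo a prepararte para tu examen. Puedo:\n\n• Crear un plan de estudio personalizado\n• Generar preguntas de práctica\n• Resumir material extenso\n• Sugerir técnicas de memorización\n• Organizar sesiones de repaso\n\n¿De qué materia es tu examen y cuánto tiempo tienes para prepararte?"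
--
--     elif any(word in message for word in ['resumir', 'summary', 'resumen', 'material']):
--         return f"Claro, {user_name}. Puedo resumir material de estudio para ti. Los resúmenes incluyen:\n\n• Puntos clave del contenido\n• Conceptos principales\n• Ejemplos importantes\n• Conexiones entre ideas\n\n¿Qué material específico te gustaría que resuma?"
--
--     return f"Entiendo tu consulta, {user_name}. Como tu tutor virtual, puedo explicarte conceptos, ayudarte con ejercicios, crear planes de estudio y resumir material. ¿En qué tema específico necesitas ayuda?"
-- ===== SOURCE B (Python) =====
-- def _generate_student_response(message, user_name):
--     """Genera respuestas específicas para estudiantes.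
--     Single flat pass: compute the minimal matching category index over a
--     keyword->category map, then index into a template array once."""
--     KEYWORD_CATEGORY = {
--         'explicar': 0, 'explain': 0, 'entender': 0, 'understand': 0, 'concepto': 0,
--         'ejercicio': 1, 'problema': 1, 'tarea': 1, 'homework': 1,
--         'examen': 2, 'exam': 2, 'estudiar': 2, 'study': 2, 'repasar': 2,
--         'resumir': 3, 'summary': 3, 'resumen': 3, 'material': 3,
--     }
--     best = 4
--     for word, cat in KEYWORD_CATEGORY.items():
--         if word in message and cat < best:
--             best = cat
--     TEMPLATES = [
--         "¡Por supuesto, {u}! Me encanta explicar conceptos. Para darte la mejor explicación posible:\n\n• Dime qué concepto específico quieres que explique\n• Indica la materia o área de estudio\n• Menciona tu nivel actual de conocimiento\n\nAsí podré adaptar mi explicación a tu nivel y estilo de aprendizaje.",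
--         "Te ayudo a resolver ejercicios paso a paso, {u}. Para darte la mejor asistencia:\n\n• Comparte el enunciado completo del problema\n• Indica la materia (matemáticas, física, química, etc.)\n• Dime qué parte específica te está causando dificultad\n\nTe guiaré a través de la solución de manera didáctica.",
--         "¡Perfecto, {u}! Te ayudo a prepararte para tu examen. Puedo:\n\n• Crear un plan de estudio personalizado\n• Generar preguntas de práctica\n• Resumir material extenso\n• Sugerir técnicas de memorización\n• Organizar sesiones de repaso\n\n¿De qué materia es tu examen y cuánto tiempo tienes para prepararte?",
--         "Claro, {u}. Puedo resumir material de estudio para ti. Los resúmenes incluyen:\n\n• Puntos clave del contenido\n• Conceptos principales\n• Ejemplos importantes\n• Conexiones entre ideas\n\n¿Qué material específico te gustaría que resuma?",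
--         "Entiendo tu consulta, {u}. Como tu tutor virtual, puedo explicarte conceptos, ayudarte con ejercicios, crear planes de estudio y resumir material. ¿En qué tema específico necesitas ayuda?",
--     ]
--     return TEMPLATES[best].format(u=user_name)
-- ===== Notes on version B (the rewrite author's own statement) =====
-- stated objective: alternative
-- what changed: Instead of an ordered if/elif chain of per-group any() checks with early exit, B makes one flat pass over a keyword->category map accumulating the minimal matching category index and then indexes a template array once; first-match-wins coincides with the minimum because groups are ordered by index.
import Mathlib
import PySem

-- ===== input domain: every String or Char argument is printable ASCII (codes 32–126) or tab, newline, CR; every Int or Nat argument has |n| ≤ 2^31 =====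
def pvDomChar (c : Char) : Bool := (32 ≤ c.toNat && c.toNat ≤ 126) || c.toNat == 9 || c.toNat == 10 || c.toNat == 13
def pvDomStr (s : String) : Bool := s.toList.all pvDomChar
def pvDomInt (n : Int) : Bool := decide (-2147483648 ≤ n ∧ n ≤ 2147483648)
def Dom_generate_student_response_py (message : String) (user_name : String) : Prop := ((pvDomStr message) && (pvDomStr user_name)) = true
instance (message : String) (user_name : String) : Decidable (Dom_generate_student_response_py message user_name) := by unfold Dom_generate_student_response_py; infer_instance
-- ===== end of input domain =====

-- B replaces the ordered if/elif dispatch by one flat min-accumulator pass over a keyword->category map plus a single template-array index (alternative decomposition, same cost).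
-- ===== PORT A =====
def generate_student_response_py (message : String) (user_name : String) : String :=
  if ["explicar", "explain", "entender", "understand", "concepto"].any (fun w => PySem.Str.isIn w message) then
    "¡Por supuesto, " ++ user_name ++ "! Me encanta explicar conceptos. Para darte la mejor explicación posible:\n\n• Dime qué concepto específico quieres que explique\n• Indica la materia o área de estudio\n• Menciona tu nivel actual de conocimiento\n\nAsí podré adaptar mi explicación a tu nivel y estilo de aprendizaje."
  else
  if ["ejercicio", "problema", "tarea", "homework"].any (fun w => PySem.Str.isIn w message) then
    "Te ayudo a resolver ejercicios paso a paso, " ++ user_name ++ ". Para darte la mejor asistencia:\n\n• Comparte el enunciado completo del problema\n• Indica la materia (matemáticas, física, química, etc.)\n• Dime qué parte específica te está causando dificultad\n\nTe guiaré a través de la solución de manera didáctica."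
  else
  if ["examen", "exam", "estudiar", "study", "repasar"].any (fun w => PySem.Str.isIn w message) then
    "¡Perfecto, " ++ user_name ++ "! Te ayudo a prepararte para tu examen. Puedo:\n\n• Crear un plan de estudio personalizado\n• Generar preguntas de práctica\n• Resumir material extenso\n• Sugerir técnicas de memorización\n• Organizar sesiones de repaso\n\n¿De qué materia es tu examen y cuánto tiempo tienes para prepararte?"
  else
  if ["resumir", "summary", "resumen", "material"].any (fun w => PySem.Str.isIn w message) then
    "Claro, " ++ user_name ++ ". Puedo resumir material de estudio para ti. Los resúmenes incluyen:\n\n• Puntos clave del contenido\n• Conceptos principales\n• Ejemplos importantes\n• Conexiones entre ideas\n\n¿Qué material específico te gustaría que resuma?"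
  else
  "Entiendo tu consulta, " ++ user_name ++ ". Como tu tutor virtual, puedo explicarte conceptos, ayudarte con ejercicios, crear planes de estudio y resumir material. ¿En qué tema específico necesitas ayuda?"

-- ===== PORT B =====
-- Source B's KEYWORD_CATEGORY dict, in insertion order
def pvKwCat : List (String × Nat) :=
  [("explicar", 0), ("explain", 0), ("entender", 0), ("understand", 0), ("concepto", 0),
   ("ejercicio", 1), ("problema", 1), ("tarea", 1), ("homework", 1),
   ("examen", 2), ("exam", 2), ("estudiar", 2), ("study", 2), ("repasar", 2),
   ("resumir", 3), ("summary", 3), ("resumen", 3), ("material", 3)]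

-- Source B's TEMPLATES list, as functions of the user name (the {u} slot)
def pvTemplates (u : String) : List String :=
  ["¡Por supuesto, " ++ u ++ "! Me encanta explicar conceptos. Para darte la mejor explicación posible:\n\n• Dime qué concepto específico quieres que explique\n• Indica la materia o área de estudio\n• Menciona tu nivel actual de conocimiento\n\nAsí podré adaptar mi explicación a tu nivel y estilo de aprendizaje.",
   "Te ayudo a resolver ejercicios paso a paso, " ++ u ++ ". Para darte la mejor asistencia:\n\n• Comparte el enunciado completo del problema\n• Indica la materia (matemáticas, física, química, etc.)\n• Dime qué parte específica te está causando dificultad\n\nTe guiaré a través de la solución de manera didáctica.",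
   "¡Perfecto, " ++ u ++ "! Te ayudo a prepararte para tu examen. Puedo:\n\n• Crear un plan de estudio personalizado\n• Generar preguntas de práctica\n• Resumir material extenso\n• Sugerir técnicas de memorización\n• Organizar sesiones de repaso\n\n¿De qué materia es tu examen y cuánto tiempo tienes para prepararte?",
   "Claro, " ++ u ++ ". Puedo resumir material de estudio para ti. Los resúmenes incluyen:\n\n• Puntos clave del contenido\n• Conceptos principales\n• Ejemplos importantes\n• Conexiones entre ideas\n\n¿Qué material específico te gustaría que resuma?",
   "Entiendo tu consulta, " ++ u ++ ". Como tu tutor virtual, puedo explicarte conceptos, ayudarte con ejercicios, crear planes de estudio y resumir material. ¿En qué tema específico necesitas ayuda?"]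

-- the loop body: keep the smaller matching category
def pvStep (message : String) (best : Nat) (p : String × Nat) : Nat :=
  if PySem.Str.isIn p.1 message && p.2 < best then p.2 else best

def generate_student_response_py_alt (message : String) (user_name : String) : String :=
  let best := pvKwCat.foldl (pvStep message) 4
  (pvTemplates user_name).getD best ""   -- TEMPLATES[best]; best ≤ 4 always, so in range

-- ===== PRECONDITION & SPEC =====
def Spec_generate_student_response_py (message : String) (user_name : String) (out : String) : Prop := out = generate_student_response_py_alt message user_name
instance (message : String) (user_name : String) (out : String) : Decidable (Spec_generate_student_response_py message user_name out) := by unfold Spec_generate_student_response_py; infer_instance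

-- ===== CLAIM (what is proved, stated in full; the proofs are below) =====
def Claim_equal_generate_student_response_py : Prop := ∀ (message : String) (user_name : String), Dom_generate_student_response_py message user_name → Spec_generate_student_response_py message user_name (generate_student_response_py message user_name)

-- ===== LEMMAS AND PROOFS =====

-- folding a uniform-category segment computes the min with that category iff any keyword matches
theorem pvStep_group (message : String) (c : Nat) (ws : List String) (b : Nat) :
    (ws.map (fun w => (w, c))).foldl (pvStep message) b
      = if ws.any (fun w => PySem.Str.isIn w message) then min b c else b := by
  induction ws generalizing b with
  | nil => simp
  | cons w ws ih =>
    by_cases h : PySem.Str.isIn w message = true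
    · have hb : pvStep message b (w, c) = min b c := by
        unfold pvStep
        by_cases hc : c < b
        · rw [if_pos (by simp only [h, Bool.true_and, decide_eq_true_eq]; exact hc)]
          omega
        · rw [if_neg (by simp only [h, Bool.true_and, decide_eq_true_eq]; exact hc)]
          omega
      simp only [List.map_cons, List.foldl_cons, hb, ih, List.any_cons, h, Bool.true_or, if_true]
      by_cases ha : (ws.any fun w => PySem.Str.isIn w message) = true
      · simp only [ha, if_true]; omega
      · simp only [ha]; simp
    · have hb : pvStep message b (w, c) = b := by
        unfold pvStep
        rw [if_neg (by simp only [Bool.not_eq_true] at h; simp only [h, Bool.false_and]; exact Bool.false_ne_true)]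
      simp only [List.map_cons, List.foldl_cons, hb, ih, List.any_cons, h, Bool.false_or]

theorem generate_student_response_py_spec : Claim_equal_generate_student_response_py := by
  intro message user_name _
  unfold Spec_generate_student_response_py generate_student_response_py generate_student_response_py_alt
  have hkw : pvKwCat
      = (["explicar", "explain", "entender", "understand", "concepto"].map (fun w => (w, 0)))
        ++ (["ejercicio", "problema", "tarea", "homework"].map (fun w => (w, 1)))
        ++ (["examen", "exam", "estudiar", "study", "repasar"].map (fun w => (w, 2)))
        ++ (["resumir", "summary", "resumen", "material"].map (fun w => (w, 3))) := by rfl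
  rw [hkw]
  rw [List.foldl_append, List.foldl_append, List.foldl_append]
  rw [pvStep_group, pvStep_group, pvStep_group, pvStep_group]
  by_cases h0 : (["explicar", "explain", "entender", "understand", "concepto"].any (fun w => PySem.Str.isIn w message)) = true <;>
  by_cases h1 : (["ejercicio", "problema", "tarea", "homework"].any (fun w => PySem.Str.isIn w message)) = true <;>
  by_cases h2 : (["examen", "exam", "estudiar", "study", "repasar"].any (fun w => PySem.Str.isIn w message)) = true <;>
  by_cases h3 : (["resumir", "summary", "resumen", "material"].any (fun w => PySem.Str.isIn w message)) = true <;>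
  simp only [h0, h1, h2, h3, if_true] <;>
  rfl
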